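-- pv_equiv track=rewrite | github.com/ivekhov/hexletpy | collections/tasks_lists.py | unique_sequence_length
-- ===== SOURCE A (Python) =====
-- def unique_sequence_length(string):
--     unique_sequence = set()
--     length = 0
--     for char in string:
--         if char in unique_sequence:
--             break
--         unique_sequence.add(char)
--         length += 1
--     return length
-- ===== SOURCE B (Python) =====
-- def unique_sequence_length(string):
--     # All-distinct prefixes are downward closed, so "prefix of length k has k
--     # distinct characters" is a monotone predicate: binary-search the largest such k.
--     lo, hi = 0, len(string)
--     while lo < hi:
--         mid = (lo + hi + 1) // 2
--         if len(set(string[:mid])) == mid: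
--             lo = mid
--         else:
--             hi = mid - 1
--     return lo
-- ===== Notes on version B (the rewrite author's own statement) =====
-- stated objective: alternative
-- what changed: Instead of a single left-to-right pass with a running seen-set and break on the first repeat, B binary-searches the largest prefix length k whose prefix has exactly k distinct characters; this is correct because all-distinct prefixes are downward closed, so the tested predicate is monotone and its maximum is the first-repeat index.
import Mathlib
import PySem

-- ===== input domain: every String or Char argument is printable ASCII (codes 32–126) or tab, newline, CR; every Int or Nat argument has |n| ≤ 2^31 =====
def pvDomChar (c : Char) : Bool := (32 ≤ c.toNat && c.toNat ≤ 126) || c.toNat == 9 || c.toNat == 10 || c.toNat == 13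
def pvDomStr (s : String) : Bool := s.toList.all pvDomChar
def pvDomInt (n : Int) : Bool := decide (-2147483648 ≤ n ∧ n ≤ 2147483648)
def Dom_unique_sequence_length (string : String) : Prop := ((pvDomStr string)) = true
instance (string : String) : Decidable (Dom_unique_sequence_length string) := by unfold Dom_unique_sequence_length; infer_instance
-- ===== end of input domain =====

-- B replaces A's single pass (running seen-set, break on first repeat) with a binary search
-- for the largest prefix length k whose length-k prefix has k distinct characters (a monotone
-- predicate, since all-distinct prefixes are downward closed); objective: alternative.


-- ===== PORT A =====
-- loop over the characters, maintaining the set of seen chars and the length; break on repeat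
def uslLoopA : List Char → PySem.Set Char → Int → Int
  | [], _, length => length
  | c :: rest, seen, length =>
    if PySem.Set.contains seen c then length
    else uslLoopA rest (PySem.Set.add seen c) (length + 1)

def unique_sequence_length (string : String) : Int :=
  uslLoopA string.toList PySem.Set.empty 0

-- ===== PORT B =====
-- lo, hi = 0, len(string); while lo < hi: mid = (lo+hi+1)//2; narrow by the distinctness test.
-- lo, hi, mid stay non-negative, so Python's // 2 is Nat division; string[:mid] is List.take mid
-- and set(...) is PySem.Set.ofList.
def uslBS (cs : List Char) (lo hi : Nat) : Int :=
  if lo < hi then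
    let mid := (lo + hi + 1) / 2
    if (PySem.Set.ofList (cs.take mid)).length = mid then uslBS cs mid hi
    else uslBS cs lo (mid - 1)
  else (lo : Int)
termination_by hi - lo
decreasing_by all_goals omega

def unique_sequence_length_alt (string : String) : Int :=
  uslBS string.toList 0 string.toList.length

-- ===== PRECONDITION & SPEC =====
def Spec_unique_sequence_length (string : String) (out : Int) : Prop := out = unique_sequence_length_alt string
instance (string : String) (out : Int) : Decidable (Spec_unique_sequence_length string out) := by unfold Spec_unique_sequence_length; infer_instance

-- ===== CLAIM (what is proved, stated in full; the proofs are below) =====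
def Claim_equal_unique_sequence_length : Prop := ∀ (string : String), Dom_unique_sequence_length string → Spec_unique_sequence_length string (unique_sequence_length string)

-- ===== LEMMAS AND PROOFS =====
-- Reference scan (proof device only): the least index i whose character already occurs in the
-- preceding prefix, else the length.
def refScan (cs : List Char) (i : Nat) : Int :=
  if h : i < cs.length then
    if (cs.take i).contains cs[i] then (i : Int)
    else refScan cs (i + 1)
  else (cs.length : Int)
termination_by cs.length - i

-- A's loop, having consumed the repeat-free prefix `pre` (seen-set = pre, counter = pre.length),
-- computes refScan at index pre.length.
theorem uslLoopA_eq_refScan (suffix : List Char) : ∀ (pre : List Char),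
    uslLoopA suffix pre (pre.length : Int) = refScan (pre ++ suffix) pre.length := by
  induction suffix with
  | nil =>
    intro pre
    simp [uslLoopA, refScan]
  | cons c rest ih =>
    intro pre
    rw [uslLoopA, refScan]
    have hlt : pre.length < (pre ++ c :: rest).length := by simp
    rw [dif_pos hlt]
    have hget : (pre ++ c :: rest)[pre.length]'hlt = c := by
      simp [List.getElem_append_right]
    have htake : (pre ++ c :: rest).take pre.length = pre := by
      simp
    rw [hget, htake]
    by_cases hc : c ∈ pre
    · simp [PySem.Set.contains, hc]
    · have hadd : PySem.Set.add pre c = pre ++ [c] := by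
        simp [PySem.Set.add, PySem.Set.contains, hc]
      rw [if_neg (by simpa [PySem.Set.contains] using hc), if_neg (by simpa using hc), hadd]
      have := ih (pre ++ [c])
      simpa [List.append_assoc] using this

-- len(set(xs)) == len(xs) is exactly distinctness of xs.
theorem ofList_length_iff_nodup (l : List Char) :
    (PySem.Set.ofList l).length = l.length ↔ l.Nodup := by
  constructor
  · intro h
    have hn := PySem.Set.nodup_ofList (xs := l)
    have hc : (PySem.Set.ofList l).toFinset = l.toFinset := by
      ext x; simp [PySem.Set.mem_ofList]
    have h2 := List.toFinset_card_of_nodup hn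
    rw [hc, h] at h2
    exact Multiset.toFinset_card_eq_card_iff_nodup.mp h2
  · intro h; rw [PySem.Set.ofList_eq_self_of_nodup l h]

-- Characterisation of refScan: starting from a distinct prefix of length i, it returns the
-- largest r with take r distinct (equivalently the least repeat index).
theorem refScan_spec (cs : List Char) : ∀ (fuel i : Nat), cs.length - i ≤ fuel →
    i ≤ cs.length → (cs.take i).Nodup →
    ∃ r : Nat, refScan cs i = (r : Int) ∧ i ≤ r ∧ r ≤ cs.length ∧ (cs.take r).Nodup ∧
      (r < cs.length → ¬ (cs.take (r + 1)).Nodup) := by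
  intro fuel
  induction fuel with
  | zero =>
    intro i hf hle hnd
    have hi : i = cs.length := by omega
    refine ⟨cs.length, ?_, by omega, le_refl _, by simpa [hi] using hnd, by omega⟩
    rw [refScan]; simp [hi]
  | succ fuel ih =>
    intro i hf hle hnd
    by_cases h : i < cs.length
    · rw [refScan, dif_pos h]
      have htake : cs.take (i + 1) = cs.take i ++ [cs[i]] := by
        rw [List.take_add_one]; simp [h]
      by_cases hmem : cs[i] ∈ cs.take i
      · refine ⟨i, ?_, le_refl _, by omega, hnd, fun _ => ?_⟩
        · rw [if_pos (by simpa using hmem)]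
        · rw [htake, List.nodup_append]
          rintro ⟨-, -, hd⟩
          exact hd cs[i] hmem cs[i] (List.mem_singleton_self _) rfl
      · rw [if_neg (by simpa using hmem)]
        have hnd' : (cs.take (i + 1)).Nodup := by
          rw [htake, List.nodup_append]
          exact ⟨hnd, List.nodup_singleton _,
            fun a ha b hb => (List.eq_of_mem_singleton hb) ▸ fun hac => hmem (hac ▸ ha)⟩
        obtain ⟨r, h1, h2, h3, h4, h5⟩ := ih (i + 1) (by omega) (by omega) hnd'
        exact ⟨r, h1, by omega, h3, h4, h5⟩
    · have hi : i = cs.length := by omega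
      refine ⟨cs.length, ?_, by omega, le_refl _, by simpa [hi] using hnd, by omega⟩
      rw [refScan]; simp [hi]

-- The tested predicate is monotone: for k ≤ n it holds exactly when k ≤ r, where r is the
-- largest distinct-prefix length.
theorem check_iff_le (cs : List Char) (r : Nat) (hrn : r ≤ cs.length) (hnd : (cs.take r).Nodup)
    (hmax : r < cs.length → ¬ (cs.take (r + 1)).Nodup) (k : Nat) (hk : k ≤ cs.length) :
    (PySem.Set.ofList (cs.take k)).length = k ↔ k ≤ r := by
  have hlen : (cs.take k).length = k := by
    rw [List.length_take, Nat.min_eq_left hk]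
  constructor
  · intro h
    have hknd := (ofList_length_iff_nodup (cs.take k)).mp (h.trans hlen.symm)
    by_contra hgt
    have hsub : List.Sublist (cs.take (r + 1)) (cs.take k) := by
      have h2 := List.take_take (i := r + 1) (j := k) (l := cs)
      rw [Nat.min_eq_left (by omega : r + 1 ≤ k)] at h2
      exact h2 ▸ List.take_sublist _ _
    exact hmax (by omega) (hknd.sublist hsub)
  · intro h
    have hsub : List.Sublist (cs.take k) (cs.take r) := by
      have h2 := List.take_take (i := k) (j := r) (l := cs)
      rw [Nat.min_eq_left h] at h2
      exact h2 ▸ List.take_sublist _ _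
    have := (ofList_length_iff_nodup (cs.take k)).mpr (hnd.sublist hsub)
    rw [hlen] at this
    exact this

-- The binary search converges to r from any bracket lo ≤ r ≤ hi ≤ n.
theorem uslBS_eq (cs : List Char) (r : Nat) (hrn : r ≤ cs.length) (hnd : (cs.take r).Nodup)
    (hmax : r < cs.length → ¬ (cs.take (r + 1)).Nodup) :
    ∀ (fuel lo hi : Nat), hi - lo ≤ fuel → lo ≤ r → r ≤ hi → hi ≤ cs.length →
      uslBS cs lo hi = (r : Int) := by
  intro fuel
  induction fuel with
  | zero =>
    intro lo hi hf h1 h2 h3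
    rw [uslBS, if_neg (by omega)]
    omega
  | succ fuel ih =>
    intro lo hi hf h1 h2 h3
    rw [uslBS]
    by_cases hlh : lo < hi
    · rw [if_pos hlh]
      have hmid := check_iff_le cs r hrn hnd hmax ((lo + hi + 1) / 2) (by omega)
      by_cases hc : (lo + hi + 1) / 2 ≤ r
      · rw [if_pos (hmid.mpr hc)]
        exact ih _ _ (by omega) hc h2 h3
      · rw [if_neg (fun h => hc (hmid.mp h))]
        exact ih _ _ (by omega) h1 (by omega) (by omega)
    · rw [if_neg hlh]
      omega

-- ===== VERDICT (by name: the statement is the Claim_ definition above) =====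
theorem unique_sequence_length_spec : Claim_equal_unique_sequence_length := by
  intro s _
  unfold Spec_unique_sequence_length unique_sequence_length unique_sequence_length_alt
  have hA : uslLoopA s.toList PySem.Set.empty 0 = refScan s.toList 0 := by
    simpa using uslLoopA_eq_refScan s.toList []
  obtain ⟨r, h1, _, h3, h4, h5⟩ :=
    refScan_spec s.toList s.toList.length 0 (by omega) (by omega) (by simp)
  rw [hA, h1,
    uslBS_eq s.toList r h3 h4 h5 s.toList.length 0 s.toList.length (by omega) (by omega) h3
      (le_refl _)]
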